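-- pv_equiv track=rewrite | github.com/MartinDupont/dwave-test | circuit_guesser/circuits.py | make_polynomial_for_datapoint
-- ===== SOURCE A (Python) =====
-- def make_base_polynomial(y, z_1, z_2, s):
--     """
--     Makes a polynomial of form Y + Z_1, + Z_2 + 2 Y S - 2 Y Z_1 - 2 Y Z_2 - S Z_1 -  S Z_2 + Z_1 Z_2 ,
--      which represents the base_gate as a polynomial.
--     inputs: y, z_1, z_2, s are all strings which represent variable names which will be put into a binary quadratic model.
--     :return: dict of tuples to values
--     """
--     return {(y,): 1, (z_1,): 1, (z_2,): 1, (y, z_1): -2, (y, z_2): -2, (y, s): 2, (z_1, s): -1, (z_2, s): -1,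
--             (z_1, z_2): 1}
--
-- def make_output_polynomial(y_val, z_1, z_2, s):
--     """
--     Makes a polynomial as above which contains the restriction that y is equal to a certain value. ,
--     inputs: z_1, z_2, s are all strings which represent variable names which will be put into a binary quadratic model.
--     y_val is the actual value of y.
--     :return: dict of tuples to values
--     """
--
--     if not y_val:
--         return {(z_1,): 1, (z_2,): 1, (z_1, s): -1, (z_2, s): -1, (z_1, z_2): 1}
--     else:
--         return {(z_1,): -1, (z_2,): -1, (s,): 2, (z_1, s): -1, (z_2, s): -1, (z_1, z_2): 1}
--
-- def make_input_polynomial(y, z_1_val, z_2_val, s):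
--     """
--     Makes a polynomial as above which contains the restriction that z_1 and z_2 are equal to a certain value.
--     inputs: y, z_1, z_2, s are all strings which represent variable names which will be put into a binary quadratic model.
--     :return: dict of tuples to values
--     """
--
--     if (not z_1_val) and (not z_2_val):
--         return {(y,): 1, (y, s): 2}
--     if z_1_val and z_2_val:
--         return {(y,): -3,  (y, s): 2, (s,): -2}
--
--     return {(y,): -1,  (y, s): 2, (s, ): -1}
--
-- def _merge_dicts_and_add(dict1, dict2):
--     output_dict = { key: value for key, value in dict1.items() }
--     for key, value in dict2.items():
--         output_dict[key] = output_dict.get(key, 0) + value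
--
--     return output_dict
--
-- def merge_dicts_and_add(*args):
--     output = {}
--     for d in args:
--         output = _merge_dicts_and_add(output, d)
--     return output
--
-- def make_polynomial_for_datapoint(y_val, x_vals, z_start=0):
--     if len(x_vals) == 2:
--         return {  ('s_0',): 2 * y_val, ('s_0',): -1 * x_vals[0], ('s_0',): -1 * x_vals[1] }, 0
--     if len(x_vals) < 2:
--         raise ValueError("Please input a non-trivial amount of x values")
--
--     polynomial = {}
--
--     # First layer
--     layer = ["z_{}".format(i + z_start) for i in range(len(x_vals)-1)]
--     s_vals = ["s_{}".format(i) for i in range(len(x_vals)-1)]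
--     auxiliary_bit_tally = len(layer) + z_start
--     s_bit_tally = len(s_vals)
--     for x_i, x_j, z_i, s in zip(x_vals[0:-1], x_vals[1:], layer, s_vals):
--         polynomial = merge_dicts_and_add(polynomial, make_input_polynomial(z_i, x_i, x_j, s))
--
--     # Middle layers
--     while len(layer) > 2:
--         next_layer = ["z_{}".format(i + auxiliary_bit_tally) for i in range(len(layer)-1)]
--         s_vals = ["s_{}".format(i + s_bit_tally) for i in range(len(layer)-1)]
--         for y, x_i, x_j, s in zip(next_layer, layer[0:-1], layer[1:], s_vals):
--             polynomial = merge_dicts_and_add(polynomial, make_base_polynomial(y, x_i, x_j, s))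
--
--         layer = next_layer
--         auxiliary_bit_tally += len(next_layer)
--         s_bit_tally += len(s_vals)
--
--
--     # End layer
--     z_1 = layer[0]
--     z_2 = layer[1]
--     s = "s_{}".format(s_bit_tally)
--     polynomial = merge_dicts_and_add(polynomial, make_output_polynomial(y_val, z_1, z_2, s))
--     return polynomial, auxiliary_bit_tally
-- ===== SOURCE B (Python) =====
-- def make_polynomial_for_datapoint(y_val, x_vals, z_start=0):
--     n = len(x_vals)
--     if n == 2:
--         return {('s_0',): 2 * y_val - x_vals[0] - x_vals[1]}, 0
--     if n < 2:
--         raise ValueError("Please input a non-trivial amount of x values")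
--
--     m = n - 1
--     terms = []
--
--     # First layer: emit the input-gate terms of gate i directly from x_vals.
--     for i in range(m):
--         z = 'z_{}'.format(z_start + i)
--         s = 's_{}'.format(i)
--         a, b = x_vals[i], x_vals[i + 1]
--         if not a and not b:
--             terms += [((z,), 1), ((z, s), 2)]
--         elif a and b:
--             terms += [((z,), -3), ((z, s), 2), ((s,), -2)]
--         else:
--             terms += [((z,), -1), ((z, s), 2), ((s,), -1)]
--
--     # Middle layers: every gate addressed by closed-form triangular-number index
--     # formulas -- no layer name lists, no running tallies, no while loop.
--     for l in range(m - 2):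
--         base = z_start + (l * m - l * (l - 1) // 2)
--         zt = base + (m - l)
--         st = m + l * (m - 1) - l * (l - 1) // 2
--         for i in range(m - 1 - l):
--             y = 'z_{}'.format(zt + i)
--             z1 = 'z_{}'.format(base + i)
--             z2 = 'z_{}'.format(base + i + 1)
--             s = 's_{}'.format(st + i)
--             terms += [((y,), 1), ((z1,), 1), ((z2,), 1), ((y, z1), -2), ((y, z2), -2),
--                       ((y, s), 2), ((z1, s), -1), ((z2, s), -1), ((z1, z2), 1)]
--
--     # End layer: its variables in closed form too.
--     zc = m * (m + 1) // 2 - 1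
--     aux = z_start + zc
--     z1 = 'z_{}'.format(aux - 2)
--     z2 = 'z_{}'.format(aux - 1)
--     s = 's_{}'.format(zc)
--     if not y_val:
--         terms += [((z1,), 1), ((z2,), 1)]
--     else:
--         terms += [((z1,), -1), ((z2,), -1), ((s,), 2)]
--     terms += [((z1, s), -1), ((z2, s), -1), ((z1, z2), 1)]
--
--     # Single aggregation pass over the flat term stream.
--     poly = {}
--     for key, val in terms:
--         poly[key] = poly.get(key, 0) + val
--     return poly, aux
-- ===== Notes on version B (the rewrite author's own statement) =====
-- stated objective: faster
-- what changed: B first emits the whole gate-term stream as one flat list, addressing every middle-layer gate by closed-form triangular-number index formulas (no layer name lists, no shrinking while-loop with running tallies, no dict merging/copying), and then aggregates the stream into the dict in a single pass.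
-- intended difference: On inputs with exactly two x values A's dict literal repeats the key ('s_0',) three times, so A returns {('s_0',): -x_vals[1]}, silently dropping the 2*y_val and -x_vals[0] terms; B returns the evidently intended single merged term {('s_0',): 2*y_val - x_vals[0] - x_vals[1]}. — e.g. on make_polynomial_for_datapoint(1, [0, 1], 0): A returns ([(["s_0"], -1)], 0), B returns ([(["s_0"], 1)], 0)
import Mathlib
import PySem

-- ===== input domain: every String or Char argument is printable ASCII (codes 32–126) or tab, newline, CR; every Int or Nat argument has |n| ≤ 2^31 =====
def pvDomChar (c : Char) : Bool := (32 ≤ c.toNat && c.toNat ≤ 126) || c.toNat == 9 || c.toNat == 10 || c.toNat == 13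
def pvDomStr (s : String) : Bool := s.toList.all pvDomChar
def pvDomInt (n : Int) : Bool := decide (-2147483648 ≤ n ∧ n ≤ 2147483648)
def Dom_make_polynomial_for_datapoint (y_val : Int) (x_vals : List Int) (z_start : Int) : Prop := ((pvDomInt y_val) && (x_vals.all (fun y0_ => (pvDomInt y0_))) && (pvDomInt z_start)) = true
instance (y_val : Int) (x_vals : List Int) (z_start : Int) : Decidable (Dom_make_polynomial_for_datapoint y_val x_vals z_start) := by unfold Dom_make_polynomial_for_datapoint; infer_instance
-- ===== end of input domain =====

-- B emits the full gate-term stream as one flat list via closed-form triangular-number index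
-- formulas and aggregates it into the dict in a single pass, replacing A's layer-list while-loop
-- with its repeated whole-dict copying merges (objective: faster; measured asymptotic).

-- polynomial dicts map tuples of variable names to coefficients
def pvPoly : Type := PySem.Dict (List String) Int

-- "z_{}".format(i) / "s_{}".format(i), ported char-exactly via PySem.Int.toChars (= str(i))
def pvZ (i : Int) : String := String.ofList ('z' :: '_' :: PySem.Int.toChars i)
def pvS (i : Int) : String := String.ofList ('s' :: '_' :: PySem.Int.toChars i)

-- ===== PORT A =====

def make_base_polynomial (y z_1 z_2 s : String) : pvPoly :=
  ((((((((PySem.Dict.empty.insert [y] 1).insert [z_1] 1).insert [z_2] 1).insert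
    [y, z_1] (-2)).insert [y, z_2] (-2)).insert [y, s] 2).insert
    [z_1, s] (-1)).insert [z_2, s] (-1)).insert [z_1, z_2] 1

def make_output_polynomial (y_val : Int) (z_1 z_2 s : String) : pvPoly :=
  if y_val = 0 then
    ((((PySem.Dict.empty.insert [z_1] 1).insert [z_2] 1).insert
      [z_1, s] (-1)).insert [z_2, s] (-1)).insert [z_1, z_2] 1
  else
    (((((PySem.Dict.empty.insert [z_1] (-1)).insert [z_2] (-1)).insert [s] 2).insert
      [z_1, s] (-1)).insert [z_2, s] (-1)).insert [z_1, z_2] 1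

def make_input_polynomial (y : String) (z_1_val z_2_val : Int) (s : String) : pvPoly :=
  if z_1_val = 0 ∧ z_2_val = 0 then
    (PySem.Dict.empty.insert [y] 1).insert [y, s] 2
  else if z_1_val ≠ 0 ∧ z_2_val ≠ 0 then
    ((PySem.Dict.empty.insert [y] (-3)).insert [y, s] 2).insert [s] (-2)
  else
    ((PySem.Dict.empty.insert [y] (-1)).insert [y, s] 2).insert [s] (-1)

-- _merge_dicts_and_add: rebuild dict1 by comprehension, then add dict2's items
def pv_merge_dicts_and_add (dict1 dict2 : pvPoly) : pvPoly :=
  let output_dict := dict1.items.foldl (fun o p => o.insert p.1 p.2) PySem.Dict.empty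
  dict2.items.foldl (fun o p => o.insert p.1 (o.getD p.1 0 + p.2)) output_dict

def merge_dicts_and_add (args : List pvPoly) : pvPoly :=
  args.foldl (fun output d => pv_merge_dicts_and_add output d) PySem.Dict.empty

-- the 'while len(layer) > 2' middle-layer loop of A
def pvALoop (polynomial : pvPoly) (layer : List String) (aux : Int) (s_tally : Int) :
    pvPoly × List String × Int × Int :=
  if layer.length > 2 then
    let next_layer := (List.range (layer.length - 1)).map (fun (i : Nat) => pvZ ((i : Int) + aux))
    let s_vals := (List.range (layer.length - 1)).map (fun (i : Nat) => pvS ((i : Int) + s_tally))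
    let poly' := (next_layer.zip ((PySem.List.slice layer (some 0) (some (-1))).zip
        ((PySem.List.slice layer (some 1) none).zip s_vals))).foldl
        (fun p q => merge_dicts_and_add [p, make_base_polynomial q.1 q.2.1 q.2.2.1 q.2.2.2])
        polynomial
    pvALoop poly' next_layer (aux + (next_layer.length : Int)) (s_tally + (s_vals.length : Int))
  else (polynomial, layer, aux, s_tally)
termination_by layer.length
decreasing_by simp; omega

def make_polynomial_for_datapoint (y_val : Int) (x_vals : List Int) (z_start : Int) :
    (List (List String × Int)) × Int :=
  if x_vals.length = 2 then
    -- dict literal with a repeated key: later values overwrite in place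
    ((((PySem.Dict.empty.insert ["s_0"] (2 * y_val)).insert
        ["s_0"] (-1 * x_vals.getD 0 0)).insert ["s_0"] (-1 * x_vals.getD 1 0) : pvPoly).items, 0)
  else if x_vals.length < 2 then ([], 0)  -- Python raises ValueError here; excluded by Pre_
  else
    let layer := (List.range (x_vals.length - 1)).map (fun (i : Nat) => pvZ ((i : Int) + z_start))
    let s_vals := (List.range (x_vals.length - 1)).map (fun (i : Nat) => pvS (i : Int))
    let aux : Int := (layer.length : Int) + z_start
    let s_tally : Int := (s_vals.length : Int)
    let polynomial := ((PySem.List.slice x_vals (some 0) (some (-1))).zip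
        ((PySem.List.slice x_vals (some 1) none).zip (layer.zip s_vals))).foldl
        (fun p q => merge_dicts_and_add [p, make_input_polynomial q.2.2.1 q.1 q.2.1 q.2.2.2])
        PySem.Dict.empty
    let r := pvALoop polynomial layer aux s_tally
    let z_1 := r.2.1.getD 0 ""    -- layer[0]; the loop always leaves 2 entries
    let z_2 := r.2.1.getD 1 ""    -- layer[1]
    let s := pvS r.2.2.2
    ((merge_dicts_and_add [r.1, make_output_polynomial y_val z_1 z_2 s]).items, r.2.2.1)

-- ===== PORT B =====

-- poly[key] = poly.get(key, 0) + val  (B's single aggregation step)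
def pvBump (p : pvPoly) (k : List String) (v : Int) : pvPoly :=
  p.insert k (p.getD k 0 + v)

-- l * (l - 1) // 2 (exact on naturals, as in Source B)
def pvTri (l : Nat) : Nat := l * (l - 1) / 2

-- the nine term pairs one base gate appends to the stream
def pvGate (y z1 z2 s : String) : List (List String × Int) :=
  [([y], 1), ([z1], 1), ([z2], 1), ([y, z1], -2), ([y, z2], -2), ([y, s], 2),
   ([z1, s], -1), ([z2, s], -1), ([z1, z2], 1)]

-- first-layer terms, emitted per gate i from x_vals
def pvTermsFirst (x_vals : List Int) (z_start : Int) (m : Nat) : List (List String × Int) :=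
  (List.range m).flatMap (fun (i : Nat) =>
    if x_vals.getD i 0 = 0 ∧ x_vals.getD (i + 1) 0 = 0 then
      [([pvZ (z_start + (i : Int))], 1), ([pvZ (z_start + (i : Int)), pvS (i : Int)], 2)]
    else if x_vals.getD i 0 ≠ 0 ∧ x_vals.getD (i + 1) 0 ≠ 0 then
      [([pvZ (z_start + (i : Int))], -3), ([pvZ (z_start + (i : Int)), pvS (i : Int)], 2),
       ([pvS (i : Int)], -2)]
    else
      [([pvZ (z_start + (i : Int))], -1), ([pvZ (z_start + (i : Int)), pvS (i : Int)], 2),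
       ([pvS (i : Int)], -1)])

-- middle-layer terms: every gate addressed by closed-form triangular-number index formulas
def pvTermsMid (m : Nat) (z_start : Int) : List (List String × Int) :=
  (List.range (m - 2)).flatMap (fun (l : Nat) =>
    (List.range (m - 1 - l)).flatMap (fun (i : Nat) =>
      pvGate
        (pvZ (z_start + ((l * m - pvTri l : Nat) : Int) + ((m - l : Nat) : Int) + (i : Int)))
        (pvZ (z_start + ((l * m - pvTri l : Nat) : Int) + (i : Int)))
        (pvZ (z_start + ((l * m - pvTri l : Nat) : Int) + (i : Int) + 1))
        (pvS (((m + l * (m - 1) - pvTri l : Nat) : Int) + (i : Int)))))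

-- end-layer terms, variables in closed form
def pvTermsEnd (y_val : Int) (aux : Int) (zc : Nat) : List (List String × Int) :=
  (if y_val = 0 then [([pvZ (aux - 2)], 1), ([pvZ (aux - 1)], 1)]
   else [([pvZ (aux - 2)], -1), ([pvZ (aux - 1)], -1), ([pvS (zc : Int)], 2)]) ++
  [([pvZ (aux - 2), pvS (zc : Int)], -1), ([pvZ (aux - 1), pvS (zc : Int)], -1),
   ([pvZ (aux - 2), pvZ (aux - 1)], 1)]

def make_polynomial_for_datapoint_alt (y_val : Int) (x_vals : List Int) (z_start : Int) :
    (List (List String × Int)) × Int :=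
  if x_vals.length = 2 then
    ([(["s_0"], 2 * y_val - x_vals.getD 0 0 - x_vals.getD 1 0)], 0)
  else if x_vals.length < 2 then ([], 0)  -- Python raises ValueError here; excluded by Pre_
  else
    let m := x_vals.length - 1
    let zc := m * (m + 1) / 2 - 1
    let aux := z_start + (zc : Int)
    let terms := pvTermsFirst x_vals z_start m ++ pvTermsMid m z_start ++ pvTermsEnd y_val aux zc
    ((terms.foldl (fun p q => pvBump p q.1 q.2) (PySem.Dict.empty : pvPoly)).items, aux)

-- ===== PRECONDITION & SPEC =====

-- Pre_ excludes only the inputs with fewer than two x values, on which A raises ValueError.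
def Pre_make_polynomial_for_datapoint (y_val : Int) (x_vals : List Int) (z_start : Int) : Prop :=
  2 ≤ x_vals.length
instance (y_val : Int) (x_vals : List Int) (z_start : Int) :
    Decidable (Pre_make_polynomial_for_datapoint y_val x_vals z_start) := by
  unfold Pre_make_polynomial_for_datapoint; infer_instance

def pvWitness_make_polynomial_for_datapoint : Int × List Int × Int := (0, [0, 1, 1], 0)

-- On inputs with exactly two x values A's dict literal repeats the key ('s_0',), so A returns
-- {('s_0',): -x_vals[1]}, silently dropping the 2*y_val and -x_vals[0] terms; B returns the
-- evidently intended merged single term {('s_0',): 2*y_val - x_vals[0] - x_vals[1]}.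
def D_make_polynomial_for_datapoint (y_val : Int) (x_vals : List Int) (z_start : Int) : Prop :=
  x_vals.length = 2
instance (y_val : Int) (x_vals : List Int) (z_start : Int) :
    Decidable (D_make_polynomial_for_datapoint y_val x_vals z_start) := by
  unfold D_make_polynomial_for_datapoint; infer_instance

def Spec_make_polynomial_for_datapoint (y_val : Int) (x_vals : List Int) (z_start : Int)
    (out : (List (List String × Int)) × Int) : Prop :=
  ¬ D_make_polynomial_for_datapoint y_val x_vals z_start →
    out = make_polynomial_for_datapoint_alt y_val x_vals z_start
instance (y_val : Int) (x_vals : List Int) (z_start : Int) (out : (List (List String × Int)) × Int) :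
    Decidable (Spec_make_polynomial_for_datapoint y_val x_vals z_start out) := by
  unfold Spec_make_polynomial_for_datapoint; infer_instance

def pvDiffWitness_make_polynomial_for_datapoint : Int × List Int × Int := (1, [0, 1], 0)
def pvDiffWitnessOut_make_polynomial_for_datapoint :
    ((List (List String × Int)) × Int) × ((List (List String × Int)) × Int) :=
  (([(["s_0"], -1)], 0), ([(["s_0"], 1)], 0))

-- ===== CLAIM (what is proved, stated in full; the proofs are below) =====
def Claim_unchanged_make_polynomial_for_datapoint : Prop :=
  ∀ (y_val : Int) (x_vals : List Int) (z_start : Int),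
    Dom_make_polynomial_for_datapoint y_val x_vals z_start →
    Pre_make_polynomial_for_datapoint y_val x_vals z_start →
    Spec_make_polynomial_for_datapoint y_val x_vals z_start
      (make_polynomial_for_datapoint y_val x_vals z_start)

def Claim_changed_make_polynomial_for_datapoint : Prop :=
  Dom_make_polynomial_for_datapoint (pvDiffWitness_make_polynomial_for_datapoint.1) (pvDiffWitness_make_polynomial_for_datapoint.2.1) (pvDiffWitness_make_polynomial_for_datapoint.2.2) ∧
  Pre_make_polynomial_for_datapoint (pvDiffWitness_make_polynomial_for_datapoint.1) (pvDiffWitness_make_polynomial_for_datapoint.2.1) (pvDiffWitness_make_polynomial_for_datapoint.2.2) ∧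
  D_make_polynomial_for_datapoint (pvDiffWitness_make_polynomial_for_datapoint.1) (pvDiffWitness_make_polynomial_for_datapoint.2.1) (pvDiffWitness_make_polynomial_for_datapoint.2.2) ∧
  make_polynomial_for_datapoint (pvDiffWitness_make_polynomial_for_datapoint.1) (pvDiffWitness_make_polynomial_for_datapoint.2.1) (pvDiffWitness_make_polynomial_for_datapoint.2.2) = pvDiffWitnessOut_make_polynomial_for_datapoint.1 ∧
  make_polynomial_for_datapoint_alt (pvDiffWitness_make_polynomial_for_datapoint.1) (pvDiffWitness_make_polynomial_for_datapoint.2.1) (pvDiffWitness_make_polynomial_for_datapoint.2.2) = pvDiffWitnessOut_make_polynomial_for_datapoint.2 ∧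
  pvDiffWitnessOut_make_polynomial_for_datapoint.1 ≠ pvDiffWitnessOut_make_polynomial_for_datapoint.2

-- ===== LEMMAS AND PROOFS =====

-- ---- str(n) (= PySem.Int.toChars) is injective ----

def pvVal (l : List Char) : Nat := l.foldl (fun a c => 10 * a + (c.toNat - 48)) 0

lemma pvDigitChar_dec (d : Nat) (h : d < 10) : (Nat.digitChar d).toNat - 48 = d := by
  interval_cases d <;> decide

lemma pvDigitChar_ne_dash (d : Nat) (h : d < 10) : Nat.digitChar d ≠ '-' := by
  interval_cases d <;> decide

lemma pvShift (b : Nat) : ∀ (f n : Nat) (l : List Char),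
    Nat.toDigitsCore b f n l = Nat.toDigitsCore b f n [] ++ l := by
  intro f
  induction f with
  | zero => intro n l; simp [Nat.toDigitsCore]
  | succ f ih =>
    intro n l
    simp only [Nat.toDigitsCore]
    by_cases h : n / b = 0
    · simp [h]
    · simp only [h, if_false]
      rw [ih (n / b) ((n % b).digitChar :: l), ih (n / b) [(n % b).digitChar]]
      simp

lemma pvVal_append (l : List Char) (c : Char) :
    pvVal (l ++ [c]) = 10 * pvVal l + (c.toNat - 48) := by
  simp [pvVal, List.foldl_append]

lemma pvVal_core : ∀ (f n : Nat), n < f → pvVal (Nat.toDigitsCore 10 f n []) = n := by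
  intro f
  induction f with
  | zero => omega
  | succ f ih =>
    intro n hn
    simp only [Nat.toDigitsCore]
    by_cases h : n / 10 = 0
    · have h10 : n < 10 := by omega
      simp [h, pvVal, Nat.mod_eq_of_lt h10]
      exact pvDigitChar_dec n h10
    · simp only [h, if_false]
      rw [pvShift, pvVal_append]
      have hlt : n / 10 < f := by
        have := Nat.div_lt_self (by omega : 0 < n) (by norm_num : 1 < 10)
        omega
      rw [ih _ hlt, pvDigitChar_dec _ (Nat.mod_lt n (by norm_num))]
      omega

lemma pvMem_core (b : Nat) (hbpos : 0 < b) : ∀ (f n : Nat) (l : List Char) (c : Char),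
    c ∈ Nat.toDigitsCore b f n l → c ∈ l ∨ ∃ d, d < b ∧ c = Nat.digitChar d := by
  intro f
  induction f with
  | zero => intro n l c h; simp [Nat.toDigitsCore] at h; exact Or.inl h
  | succ f ih =>
    intro n l c h
    simp only [Nat.toDigitsCore] at h
    by_cases h0 : n / b = 0
    · simp [h0] at h
      rcases h with h | h
      · exact Or.inr ⟨n % b, Nat.mod_lt n (by omega), h⟩
      · exact Or.inl h
    · simp only [h0, if_false] at h
      rcases ih (n / b) ((n % b).digitChar :: l) c h with h | h
      · rcases List.mem_cons.mp h with h | h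
        · exact Or.inr ⟨n % b, Nat.mod_lt n (by omega), h⟩
        · exact Or.inl h
      · exact Or.inr h

lemma pvDash_not_mem (n : Nat) : '-' ∉ Nat.toDigits 10 n := by
  intro h
  rcases pvMem_core 10 (by norm_num) (n + 1) n [] '-' h with h | ⟨d, hd, he⟩
  · simp at h
  · exact pvDigitChar_ne_dash d hd he.symm

lemma pvToDigits_val (n : Nat) : pvVal (Nat.toDigits 10 n) = n :=
  pvVal_core (n + 1) n (Nat.lt_succ_self n)

lemma pvToChars_inj (a b : Int) (h : PySem.Int.toChars a = PySem.Int.toChars b) : a = b := by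
  unfold PySem.Int.toChars at h
  by_cases ha : a < 0 <;> by_cases hb : b < 0 <;> simp only [ha, hb, ite_true, ite_false] at h
  · have h3 : Nat.toDigits 10 a.natAbs = Nat.toDigits 10 b.natAbs := by simpa using h
    have := congrArg pvVal h3
    rw [pvToDigits_val, pvToDigits_val] at this
    omega
  · exfalso
    apply pvDash_not_mem b.toNat
    rw [← h]
    exact List.mem_cons_self
  · exfalso
    apply pvDash_not_mem a.toNat
    rw [h]
    exact List.mem_cons_self
  · have := congrArg pvVal h
    rw [pvToDigits_val, pvToDigits_val] at this
    omega

lemma pvZ_ne (a b : Int) (h : a ≠ b) : pvZ a ≠ pvZ b := by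
  intro he
  exact h (pvToChars_inj a b (by simpa [pvZ, String.ofList_inj] using he))

lemma pvZ_ne_pvS (a b : Int) : pvZ a ≠ pvS b := by
  simp [pvZ, pvS, String.ofList_inj]

lemma pvS_ne_pvZ (a b : Int) : pvS a ≠ pvZ b := (pvZ_ne_pvS b a).symm

-- ---- merging a fresh-keyed dict literal is the same as bumping its pairs in order ----

lemma pvFoldAdd_fresh : ∀ (l : List (List String × Int)) (d : pvPoly),
    (∀ p ∈ l, d.contains p.1 = false) → (l.map Prod.fst).Nodup →
    l.foldl (fun o p => o.insert p.1 (o.getD p.1 0 + p.2)) d = PySem.Dict.mk (d.items ++ l) := by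
  intro l
  induction l with
  | nil => intro d _ _; simp; exact (PySem.Dict.ext rfl).symm
  | cons p l ih =>
    intro d hf hn
    simp only [List.foldl_cons]
    have hc := hf p List.mem_cons_self
    rw [PySem.Dict.getD_of_not_contains d 0 hc, zero_add]
    rw [ih (d.insert p.1 p.2)
      (by
        intro q hq
        rw [PySem.Dict.contains_insert]
        have : q.1 ≠ p.1 := by
          simp only [List.map_cons, List.nodup_cons] at hn
          intro he
          exact hn.1 (he ▸ List.mem_map_of_mem hq)
        simp [this]
        exact hf q (List.mem_cons_of_mem _ hq))
      (by simp only [List.map_cons, List.nodup_cons] at hn; exact hn.2)]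
    rw [PySem.Dict.items_insert_of_not_contains d p.2 hc]
    simp

lemma pvRebuild (d : pvPoly) (h : d.keys.Nodup) :
    d.items.foldl (fun o p => o.insert p.1 p.2) PySem.Dict.empty = d := by
  apply PySem.Dict.ext
  rw [PySem.Dict.items_foldl_insert_fresh d.items Prod.fst Prod.snd PySem.Dict.empty
    (by intro a _; rfl) h]
  simp [show (PySem.Dict.empty : pvPoly).items = [] from rfl]

lemma pvMerge2 (p d : pvPoly) (hp : p.keys.Nodup) :
    merge_dicts_and_add [p, d] = d.items.foldl (fun o q => pvBump o q.1 q.2) p := by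
  have s1 : pv_merge_dicts_and_add PySem.Dict.empty p = p := by
    show p.items.foldl (fun o q => o.insert q.1 (o.getD q.1 0 + q.2)) PySem.Dict.empty = p
    refine (pvFoldAdd_fresh p.items PySem.Dict.empty (fun a _ => rfl) ?_).trans ?_
    · exact hp
    · exact PySem.Dict.ext (by simp [show (PySem.Dict.empty : pvPoly).items = [] from rfl])
  unfold merge_dicts_and_add
  simp only [List.foldl_cons, List.foldl_nil]
  rw [s1]
  show d.items.foldl (fun o q => o.insert q.1 (o.getD q.1 0 + q.2))
      (p.items.foldl (fun o q => o.insert q.1 q.2) PySem.Dict.empty)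
    = d.items.foldl (fun o q => pvBump o q.1 q.2) p
  rw [pvRebuild p hp]
  rfl

-- ---- nodup-keys invariant machinery ----

lemma pvBump_nodup (p : pvPoly) (k : List String) (v : Int) (h : p.keys.Nodup) :
    (pvBump p k v).keys.Nodup := by
  unfold pvBump
  exact PySem.Dict.nodup_keys_insert _ _ _ h

lemma pvNodup_fold {α : Type} (l : List α) (g : pvPoly → α → pvPoly)
    (hg : ∀ d a, d.keys.Nodup → (g d a).keys.Nodup) :
    ∀ d, d.keys.Nodup → (l.foldl g d).keys.Nodup := by
  induction l with
  | nil => intro d h; simpa using h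
  | cons a l ih => intro d h; simp only [List.foldl_cons]; exact ih _ (hg d a h)

lemma pvFoldl_congr {α : Type} (l : List α) (f g : pvPoly → α → pvPoly)
    (hg : ∀ d a, d.keys.Nodup → (g d a).keys.Nodup)
    (he : ∀ d a, d.keys.Nodup → f d a = g d a) :
    ∀ d, d.keys.Nodup → l.foldl f d = l.foldl g d := by
  induction l with
  | nil => intro d _; rfl
  | cons a l ih =>
    intro d hd
    simp only [List.foldl_cons]
    rw [he d a hd]
    exact ih _ (hg d a hd)

-- ---- items of the sub-polynomial dict literals ----

lemma pvItems_base (y z1 z2 s : String) (h1 : y ≠ z1) (h2 : y ≠ z2) (h3 : z1 ≠ z2)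
    (h4 : s ≠ y) (h5 : s ≠ z1) (h6 : s ≠ z2) :
    (make_base_polynomial y z1 z2 s).items =
      [([y], 1), ([z1], 1), ([z2], 1), ([y, z1], -2), ([y, z2], -2), ([y, s], 2),
       ([z1, s], -1), ([z2, s], -1), ([z1, z2], 1)] := by
  unfold make_base_polynomial
  repeat rw [PySem.Dict.items_insert_of_not_contains]
  all_goals simp [show (PySem.Dict.empty : pvPoly).items = [] from rfl,
    PySem.Dict.contains_insert, beq_eq_false_iff_ne,
    h1, h2, h3, h4, h5, h6, h1.symm, h2.symm, h3.symm, h4.symm, h5.symm, h6.symm]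

lemma pvItems_input00 (y : String) (z1v z2v : Int) (s : String) (hc : z1v = 0 ∧ z2v = 0) :
    (make_input_polynomial y z1v z2v s).items = [([y], 1), ([y, s], 2)] := by
  unfold make_input_polynomial
  rw [if_pos hc]
  repeat rw [PySem.Dict.items_insert_of_not_contains]
  all_goals simp [show (PySem.Dict.empty : pvPoly).items = [] from rfl,
    PySem.Dict.contains_insert, beq_eq_false_iff_ne]

lemma pvItems_input11 (y : String) (z1v z2v : Int) (s : String)
    (hc1 : ¬(z1v = 0 ∧ z2v = 0)) (hc2 : z1v ≠ 0 ∧ z2v ≠ 0) (hys : y ≠ s) :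
    (make_input_polynomial y z1v z2v s).items = [([y], -3), ([y, s], 2), ([s], -2)] := by
  unfold make_input_polynomial
  rw [if_neg hc1, if_pos hc2]
  repeat rw [PySem.Dict.items_insert_of_not_contains]
  all_goals simp [show (PySem.Dict.empty : pvPoly).items = [] from rfl,
    PySem.Dict.contains_insert, beq_eq_false_iff_ne, hys, hys.symm]

lemma pvItems_inputmix (y : String) (z1v z2v : Int) (s : String)
    (hc1 : ¬(z1v = 0 ∧ z2v = 0)) (hc2 : ¬(z1v ≠ 0 ∧ z2v ≠ 0)) (hys : y ≠ s) :
    (make_input_polynomial y z1v z2v s).items = [([y], -1), ([y, s], 2), ([s], -1)] := by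
  unfold make_input_polynomial
  rw [if_neg hc1, if_neg hc2]
  repeat rw [PySem.Dict.items_insert_of_not_contains]
  all_goals simp [show (PySem.Dict.empty : pvPoly).items = [] from rfl,
    PySem.Dict.contains_insert, beq_eq_false_iff_ne, hys, hys.symm]

lemma pvItems_output0 (y_val : Int) (z1 z2 s : String) (hy : y_val = 0)
    (h3 : z1 ≠ z2) (h5 : s ≠ z1) (h6 : s ≠ z2) :
    (make_output_polynomial y_val z1 z2 s).items =
      [([z1], 1), ([z2], 1), ([z1, s], -1), ([z2, s], -1), ([z1, z2], 1)] := by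
  unfold make_output_polynomial
  rw [if_pos hy]
  repeat rw [PySem.Dict.items_insert_of_not_contains]
  all_goals simp [show (PySem.Dict.empty : pvPoly).items = [] from rfl,
    PySem.Dict.contains_insert, beq_eq_false_iff_ne, h3, h5, h6, h3.symm, h5.symm, h6.symm]

lemma pvItems_output1 (y_val : Int) (z1 z2 s : String) (hy : ¬ y_val = 0)
    (h3 : z1 ≠ z2) (h5 : s ≠ z1) (h6 : s ≠ z2) :
    (make_output_polynomial y_val z1 z2 s).items =
      [([z1], -1), ([z2], -1), ([s], 2), ([z1, s], -1), ([z2, s], -1), ([z1, z2], 1)] := by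
  unfold make_output_polynomial
  rw [if_neg hy]
  repeat rw [PySem.Dict.items_insert_of_not_contains]
  all_goals simp [show (PySem.Dict.empty : pvPoly).items = [] from rfl,
    PySem.Dict.contains_insert, beq_eq_false_iff_ne, h3, h5, h6, h3.symm, h5.symm, h6.symm]

-- ---- one merge step = the corresponding bump chain ----

lemma pvStep_base (p : pvPoly) (hp : p.keys.Nodup) (y z1 z2 s : String)
    (h1 : y ≠ z1) (h2 : y ≠ z2) (h3 : z1 ≠ z2) (h4 : s ≠ y) (h5 : s ≠ z1) (h6 : s ≠ z2) :
    merge_dicts_and_add [p, make_base_polynomial y z1 z2 s] =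
      (pvGate y z1 z2 s).foldl (fun o q => pvBump o q.1 q.2) p := by
  rw [pvMerge2 _ _ hp, pvItems_base y z1 z2 s h1 h2 h3 h4 h5 h6]
  rfl

lemma pvStep_input00 (p : pvPoly) (hp : p.keys.Nodup) (y : String) (z1v z2v : Int) (s : String)
    (hc : z1v = 0 ∧ z2v = 0) :
    merge_dicts_and_add [p, make_input_polynomial y z1v z2v s] =
      pvBump (pvBump p [y] 1) [y, s] 2 := by
  rw [pvMerge2 _ _ hp, pvItems_input00 y z1v z2v s hc]
  simp only [List.foldl_cons, List.foldl_nil]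

lemma pvStep_input11 (p : pvPoly) (hp : p.keys.Nodup) (y : String) (z1v z2v : Int) (s : String)
    (hc1 : ¬(z1v = 0 ∧ z2v = 0)) (hc2 : z1v ≠ 0 ∧ z2v ≠ 0) (hys : y ≠ s) :
    merge_dicts_and_add [p, make_input_polynomial y z1v z2v s] =
      pvBump (pvBump (pvBump p [y] (-3)) [y, s] 2) [s] (-2) := by
  rw [pvMerge2 _ _ hp, pvItems_input11 y z1v z2v s hc1 hc2 hys]
  simp only [List.foldl_cons, List.foldl_nil]

lemma pvStep_inputmix (p : pvPoly) (hp : p.keys.Nodup) (y : String) (z1v z2v : Int) (s : String)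
    (hc1 : ¬(z1v = 0 ∧ z2v = 0)) (hc2 : ¬(z1v ≠ 0 ∧ z2v ≠ 0)) (hys : y ≠ s) :
    merge_dicts_and_add [p, make_input_polynomial y z1v z2v s] =
      pvBump (pvBump (pvBump p [y] (-1)) [y, s] 2) [s] (-1) := by
  rw [pvMerge2 _ _ hp, pvItems_inputmix y z1v z2v s hc1 hc2 hys]
  simp only [List.foldl_cons, List.foldl_nil]

lemma pvStep_output0 (p : pvPoly) (hp : p.keys.Nodup) (y_val : Int) (z1 z2 s : String)
    (hy : y_val = 0) (h3 : z1 ≠ z2) (h5 : s ≠ z1) (h6 : s ≠ z2) :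
    merge_dicts_and_add [p, make_output_polynomial y_val z1 z2 s] =
      pvBump (pvBump (pvBump (pvBump (pvBump p [z1] 1) [z2] 1)
        [z1, s] (-1)) [z2, s] (-1)) [z1, z2] 1 := by
  rw [pvMerge2 _ _ hp, pvItems_output0 y_val z1 z2 s hy h3 h5 h6]
  simp only [List.foldl_cons, List.foldl_nil]

lemma pvStep_output1 (p : pvPoly) (hp : p.keys.Nodup) (y_val : Int) (z1 z2 s : String)
    (hy : ¬ y_val = 0) (h3 : z1 ≠ z2) (h5 : s ≠ z1) (h6 : s ≠ z2) :
    merge_dicts_and_add [p, make_output_polynomial y_val z1 z2 s] =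
      pvBump (pvBump (pvBump (pvBump (pvBump (pvBump p [z1] (-1)) [z2] (-1)) [s] 2)
        [z1, s] (-1)) [z2, s] (-1)) [z1, z2] 1 := by
  rw [pvMerge2 _ _ hp, pvItems_output1 y_val z1 z2 s hy h3 h5 h6]
  simp only [List.foldl_cons, List.foldl_nil]

-- ---- list shapes: A's zipped name lists as maps over List.range ----

lemma pvDropLast_map_range {α : Type} (f : Nat → α) (m : Nat) :
    ((List.range (m + 1)).map f).dropLast = (List.range m).map f := by
  rw [List.range_succ]
  simp

lemma pvTail_map_range {α : Type} (f : Nat → α) (m : Nat) :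
    ((List.range (m + 1)).map f).tail = (List.range m).map (fun i => f (i + 1)) := by
  rw [List.range_succ_eq_map]
  simp [List.map_map]

lemma pvDropLast_eq (xs : List Int) (m : Nat) (h : xs.length = m + 1) :
    xs.dropLast = (List.range m).map (fun (i : Nat) => xs.getD i 0) := by
  apply List.ext_getElem
  · simp [h]
  · intro i h1 h2
    simp only [List.getElem_dropLast, List.getElem_map, List.getElem_range]
    rw [List.getD_eq_getElem]

lemma pvTail_eq (xs : List Int) (m : Nat) (h : xs.length = m + 1) :
    xs.tail = (List.range m).map (fun (i : Nat) => xs.getD (i + 1) 0) := by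
  apply List.ext_getElem
  · simp [h]
  · intro i h1 h2
    simp only [List.getElem_tail, List.getElem_map, List.getElem_range]
    rw [List.getD_eq_getElem]

lemma pvZip4 {A B C D : Type} (m : Nat) (a : Nat → A) (b : Nat → B) (c : Nat → C) (d : Nat → D) :
    ((List.range m).map a).zip (((List.range m).map b).zip (((List.range m).map c).zip
      ((List.range m).map d)))
    = (List.range m).map (fun i => (a i, b i, c i, d i)) := by
  apply List.ext_getElem
  · simp
  · intro i h1 h2
    simp

-- ---- generic fold/flatMap plumbing ----

lemma pvFoldl_flatMap {α β σ : Type} (f : α → List β) (g : σ → β → σ) :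
    ∀ (l : List α) (d : σ), (l.flatMap f).foldl g d = l.foldl (fun s a => (f a).foldl g s) d := by
  intro l
  induction l with
  | nil => intro d; rfl
  | cons a l ih =>
    intro d
    simp only [List.flatMap_cons, List.foldl_append, List.foldl_cons]
    exact ih _

lemma pvFlatMap_congr {α β : Type} : ∀ (l : List α) (f g : α → List β),
    (∀ a ∈ l, f a = g a) → l.flatMap f = l.flatMap g := by
  intro l
  induction l with
  | nil => intro f g _; rfl
  | cons a l ih =>
    intro f g h
    simp only [List.flatMap_cons]
    rw [h a List.mem_cons_self, ih f g (fun b hb => h b (List.mem_cons_of_mem _ hb))]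

-- ---- triangular-number arithmetic ----

lemma pvTri_succ (l : Nat) : pvTri (l + 1) = pvTri l + l := by
  cases l with
  | zero => decide
  | succ j =>
    unfold pvTri
    simp only [Nat.add_sub_cancel]
    have h : (j + 2) * (j + 1) = (j + 1) * j + (j + 1) * 2 := by ring
    rw [h, Nat.add_mul_div_right _ _ (by norm_num : (0 : Nat) < 2)]

lemma pvTri_le (l c : Nat) (h : l ≤ c + 1) : pvTri l ≤ l * c := by
  calc pvTri l ≤ l * (l - 1) := Nat.div_le_self _ _
    _ ≤ l * c := Nat.mul_le_mul_left _ (by omega)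

lemma pvTri_pos (m : Nat) (h : 2 ≤ m) : 1 ≤ pvTri m := by
  unfold pvTri
  rw [Nat.le_div_iff_mul_le (by norm_num : (0 : Nat) < 2)]
  calc (1 * 2 : Nat) = 2 * 1 := by ring
    _ ≤ m * (m - 1) := Nat.mul_le_mul h (by omega)

-- ---- the middle term stream, generalised to an arbitrary starting layer ----

def pvMidFrom (k : Nat) (base st : Int) : List (List String × Int) :=
  (List.range (k - 2)).flatMap (fun (l : Nat) =>
    (List.range (k - 1 - l)).flatMap (fun (i : Nat) =>
      pvGate
        (pvZ (base + ((l * k - pvTri l : Nat) : Int) + ((k - l : Nat) : Int) + (i : Int)))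
        (pvZ (base + ((l * k - pvTri l : Nat) : Int) + (i : Int)))
        (pvZ (base + ((l * k - pvTri l : Nat) : Int) + (i : Int) + 1))
        (pvS (st + ((l * (k - 1) - pvTri l : Nat) : Int) + (i : Int)))))


lemma pvFoldBump_nodup (l : List (List String × Int)) (p : pvPoly) (hp : p.keys.Nodup) :
    ((l.foldl (fun o q => pvBump o q.1 q.2) p).keys.Nodup) :=
  pvNodup_fold l _ (fun d a hd => pvBump_nodup d a.1 a.2 hd) p hp

lemma pvFlatMap_map {α β γ : Type} (f : α → β) (g : β → List γ) : ∀ (l : List α),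
    (l.map f).flatMap g = l.flatMap (fun a => g (f a)) := by
  intro l
  induction l with
  | nil => rfl
  | cons a l ih => simp only [List.map_cons, List.flatMap_cons, ih]

-- B's middle term stream equals pvMidFrom at the top-level start parameters
lemma pvTermsMid_eq (m : Nat) (zs : Int) : pvTermsMid m zs = pvMidFrom m zs ((m : Nat) : Int) := by
  unfold pvTermsMid pvMidFrom
  apply pvFlatMap_congr
  intro l hl
  have hl2 : l < m - 2 := List.mem_range.mp hl
  have hle : pvTri l ≤ l * (m - 1) := pvTri_le l (m - 1) (by omega)
  have hst : ((m + l * (m - 1) - pvTri l : Nat) : Int)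
      = ((m : Nat) : Int) + ((l * (m - 1) - pvTri l : Nat) : Int) := by
    rw [Nat.cast_sub (by omega), Nat.cast_sub hle]
    push_cast
    ring
  simp only [hst]

-- one middle layer of A = the corresponding flat gate-term fold
lemma pvLayerFold (m : Nat) (hm : 2 < m) (base zt st : Int) (hz : zt = base + (m : Int))
    (p : pvPoly) (hp : p.keys.Nodup) :
    (((List.range (m - 1)).map (fun (i : Nat) => pvZ ((i : Int) + zt))).zip
      ((PySem.List.slice ((List.range m).map (fun (i : Nat) => pvZ ((i : Int) + base))) (some 0) (some (-1))).zip
        ((PySem.List.slice ((List.range m).map (fun (i : Nat) => pvZ ((i : Int) + base))) (some 1) none).zip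
          ((List.range (m - 1)).map (fun (i : Nat) => pvS ((i : Int) + st)))))).foldl
      (fun p q => merge_dicts_and_add [p, make_base_polynomial q.1 q.2.1 q.2.2.1 q.2.2.2]) p
    = ((List.range (m - 1)).flatMap (fun (i : Nat) =>
        pvGate (pvZ (zt + (i : Int))) (pvZ (base + (i : Int))) (pvZ (base + (i : Int) + 1))
          (pvS (st + (i : Int))))).foldl (fun o q => pvBump o q.1 q.2) p := by
  obtain ⟨k, rfl⟩ : ∃ k, m = k + 1 := ⟨m - 1, by omega⟩
  rw [PySem.List.slice_zero_start, PySem.List.slice_to_neg_one, PySem.List.slice_from_one]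
  simp only [Nat.add_sub_cancel]
  rw [pvDropLast_map_range, pvTail_map_range]
  rw [pvZip4 k (fun (i : Nat) => pvZ ((i : Int) + zt)) (fun (i : Nat) => pvZ ((i : Int) + base))
    (fun (i : Nat) => pvZ (((i + 1 : Nat) : Int) + base)) (fun (i : Nat) => pvS ((i : Int) + st))]
  rw [List.foldl_map, pvFoldl_flatMap]
  apply pvFoldl_congr _ _ _ ?hg ?he p hp
  case hg =>
    intro d i hd
    simp only [pvGate, List.foldl_cons, List.foldl_nil]
    repeat apply pvBump_nodup
    exact hd
  case he =>
    intro d i hd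
    simp only [show ((i : Int) + zt) = zt + (i : Int) from by ring,
      show ((i : Int) + base) = base + (i : Int) from by ring,
      show (((i + 1 : Nat) : Int) + base) = base + (i : Int) + 1 from by push_cast; ring,
      show ((i : Int) + st) = st + (i : Int) from by ring]
    rw [pvStep_base d hd _ _ _ _
      (pvZ_ne _ _ (by rw [hz]; push_cast; omega))
      (pvZ_ne _ _ (by rw [hz]; push_cast; omega))
      (pvZ_ne _ _ (by omega))
      (pvS_ne_pvZ _ _) (pvS_ne_pvZ _ _) (pvS_ne_pvZ _ _)]

-- peel the first layer off pvMidFrom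
lemma pvMidFrom_split (j : Nat) (base st : Int) :
    pvMidFrom (j + 1 + 2) base st
      = ((List.range (j + 2)).flatMap (fun (i : Nat) =>
          pvGate (pvZ (base + ((j + 1 + 2 : Nat) : Int) + (i : Int))) (pvZ (base + (i : Int)))
            (pvZ (base + (i : Int) + 1)) (pvS (st + (i : Int)))))
        ++ pvMidFrom (j + 2) (base + ((j + 1 + 2 : Nat) : Int)) (st + ((j + 2 : Nat) : Int)) := by
  unfold pvMidFrom
  rw [show (j + 1 + 2) - 2 = j + 1 from rfl, show (j + 2) - 2 = j from rfl]
  rw [List.range_succ_eq_map, List.flatMap_cons, pvFlatMap_map]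
  congr 1
  · apply pvFlatMap_congr
    intro i _
    norm_num [pvTri]
  · apply pvFlatMap_congr
    intro l hl
    have hlj : l < j := List.mem_range.mp hl
    have hle1 : pvTri l ≤ l * (j + 2) := pvTri_le l (j + 2) (by omega)
    have hle2 : pvTri (l + 1) ≤ (l + 1) * (j + 1 + 2) :=
      le_trans (pvTri_le (l + 1) (j + 2) (by omega)) (Nat.mul_le_mul_left _ (by omega))
    have hle3 : pvTri l ≤ l * (j + 1) := pvTri_le l (j + 1) (by omega)
    have hle4 : pvTri (l + 1) ≤ (l + 1) * (j + 2) := pvTri_le (l + 1) (j + 2) (by omega)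
    have e1 : base + (((l + 1) * (j + 1 + 2) - pvTri (l + 1) : Nat) : Int)
        = base + ((j + 1 + 2 : Nat) : Int) + ((l * (j + 2) - pvTri l : Nat) : Int) := by
      rw [Nat.cast_sub hle2, Nat.cast_sub hle1, pvTri_succ]
      push_cast
      ring
    have e3 : st + (((l + 1) * (j + 1 + 2 - 1) - pvTri (l + 1) : Nat) : Int)
        = st + ((j + 2 : Nat) : Int) + ((l * (j + 2 - 1) - pvTri l : Nat) : Int) := by
      rw [show (j + 1 + 2 - 1 : Nat) = j + 2 from rfl, show (j + 2 - 1 : Nat) = j + 1 from rfl]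
      rw [Nat.cast_sub hle4, Nat.cast_sub hle3, pvTri_succ]
      push_cast
      ring
    have e2 : ((j + 1 + 2 - (l + 1) : Nat) : Int) = ((j + 2 - l : Nat) : Int) := by
      congr 1
      omega
    simp only [show (j + 1 + 2 - 1 - (l + 1) : Nat) = j + 2 - 1 - l from by omega, e1, e2, e3]

-- A's middle while-loop computes the fold of pvMidFrom and the closed-form end indices
lemma pvLoopMid : ∀ (j : Nat) (p : pvPoly) (base st : Int), p.keys.Nodup →
    pvALoop p ((List.range (j + 2)).map (fun (i : Nat) => pvZ ((i : Int) + base)))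
        (base + ((j + 2 : Nat) : Int)) st
      = ((pvMidFrom (j + 2) base st).foldl (fun o q => pvBump o q.1 q.2) p,
         (List.range 2).map (fun (i : Nat) =>
           pvZ ((i : Int) + (base + ((pvTri (j + 3) - 1 : Nat) : Int) - 2))),
         base + ((pvTri (j + 3) - 1 : Nat) : Int),
         st + ((pvTri (j + 2) - 1 : Nat) : Int)) := by
  intro j
  induction j with
  | zero =>
    intro p base st hp
    rw [pvALoop]
    simp only [List.length_map, List.length_range]
    rw [if_neg (by omega)]
    have h1 : (pvTri 3 - 1 : Nat) = 2 := by decide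
    have h2 : (pvTri 2 - 1 : Nat) = 0 := by decide
    have hb : base + ((2 : Nat) : Int) - 2 = base := by push_cast; ring
    simp only [h1, h2, hb, Nat.cast_zero, add_zero, Nat.zero_add]
    have hmid : pvMidFrom 2 base st = [] := by
      unfold pvMidFrom
      rfl
    rw [hmid]
    rfl
  | succ j ih =>
    intro p base st hp
    rw [pvALoop]
    simp only [List.length_map, List.length_range]
    rw [if_pos (by omega)]
    rw [pvLayerFold (j + 1 + 2) (by omega) base (base + ((j + 1 + 2 : Nat) : Int)) st rfl p hp]
    simp only [show (j + 1 + 2 - 1 : Nat) = j + 2 from rfl, List.length_map, List.length_range]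
    rw [ih _ (base + ((j + 1 + 2 : Nat) : Int)) (st + ((j + 2 : Nat) : Int))
      (pvFoldBump_nodup _ p hp)]
    rw [pvMidFrom_split j base st, List.foldl_append]
    have hA : base + ((j + 1 + 2 : Nat) : Int) + ((pvTri (j + 3) - 1 : Nat) : Int)
        = base + ((pvTri (j + 1 + 3) - 1 : Nat) : Int) := by
      rw [Nat.cast_sub (pvTri_pos _ (by omega)), Nat.cast_sub (pvTri_pos _ (by omega)),
        show (j + 1 + 3 : Nat) = (j + 3) + 1 from rfl, pvTri_succ (j + 3)]
      push_cast
      ring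
    have hS : st + ((j + 2 : Nat) : Int) + ((pvTri (j + 2) - 1 : Nat) : Int)
        = st + ((pvTri (j + 1 + 2) - 1 : Nat) : Int) := by
      rw [Nat.cast_sub (pvTri_pos _ (by omega)), Nat.cast_sub (pvTri_pos _ (by omega)),
        show (j + 1 + 2 : Nat) = (j + 2) + 1 from rfl, pvTri_succ (j + 2)]
      push_cast
      ring
    simp only [hA, hS]

-- A's first-layer fold = the fold of B's first-layer term stream
lemma pvFirstTerms (xs : List Int) (zs : Int) (m : Nat) (hm : xs.length = m + 1) :
    ((PySem.List.slice xs (some 0) (some (-1))).zip ((PySem.List.slice xs (some 1) none).zip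
      (((List.range m).map (fun (i : Nat) => pvZ ((i : Int) + zs))).zip
        ((List.range m).map (fun (i : Nat) => pvS (i : Int)))))).foldl
      (fun p q => merge_dicts_and_add [p, make_input_polynomial q.2.2.1 q.1 q.2.1 q.2.2.2])
      PySem.Dict.empty
    = (pvTermsFirst xs zs m).foldl (fun o q => pvBump o q.1 q.2) PySem.Dict.empty := by
  rw [PySem.List.slice_zero_start, PySem.List.slice_to_neg_one, PySem.List.slice_from_one]
  rw [pvDropLast_eq xs m hm, pvTail_eq xs m hm]
  rw [pvZip4 m (fun (i : Nat) => xs.getD i 0) (fun (i : Nat) => xs.getD (i + 1) 0)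
    (fun (i : Nat) => pvZ ((i : Int) + zs)) (fun (i : Nat) => pvS (i : Int))]
  rw [List.foldl_map]
  unfold pvTermsFirst
  rw [pvFoldl_flatMap]
  apply pvFoldl_congr _ _ _ ?hg ?he PySem.Dict.empty PySem.Dict.nodup_keys_empty
  case hg =>
    intro d i hd
    split_ifs <;> simp only [List.foldl_cons, List.foldl_nil] <;>
      (repeat apply pvBump_nodup) <;> exact hd
  case he =>
    intro d i hd
    simp only [show ((i : Int) + zs) = zs + (i : Int) from by ring]
    by_cases c1 : xs.getD i 0 = 0 ∧ xs.getD (i + 1) 0 = 0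
    · rw [pvStep_input00 d hd _ _ _ _ c1, if_pos c1]
      rfl
    · by_cases c2 : xs.getD i 0 ≠ 0 ∧ xs.getD (i + 1) 0 ≠ 0
      · rw [pvStep_input11 d hd _ _ _ _ c1 c2 (pvZ_ne_pvS _ _), if_neg c1, if_pos c2]
        rfl
      · rw [pvStep_inputmix d hd _ _ _ _ c1 c2 (pvZ_ne_pvS _ _), if_neg c1, if_neg c2]
        rfl

-- ===== VERDICT (by name: the statement is the Claim_ definition above) =====
theorem make_polynomial_for_datapoint_spec : Claim_unchanged_make_polynomial_for_datapoint := by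
  intro y xs zs _dom hpre hnd
  have hn2 : xs.length ≠ 2 := by
    unfold D_make_polynomial_for_datapoint at hnd; exact hnd
  unfold Pre_make_polynomial_for_datapoint at hpre
  obtain ⟨j, hm⟩ : ∃ j, xs.length = j + 3 := ⟨xs.length - 3, by omega⟩
  show make_polynomial_for_datapoint y xs zs = make_polynomial_for_datapoint_alt y xs zs
  unfold make_polynomial_for_datapoint make_polynomial_for_datapoint_alt
  rw [if_neg hn2, if_neg (by omega : ¬ xs.length < 2), if_neg hn2,
    if_neg (by omega : ¬ xs.length < 2)]
  simp only [hm, show (j + 3 - 1 : Nat) = j + 2 from rfl, List.length_map, List.length_range]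
  rw [pvFirstTerms xs zs (j + 2) (by omega)]
  rw [show (((j + 2 : Nat)) : Int) + zs = zs + ((j + 2 : Nat) : Int) from by ring]
  rw [pvLoopMid j _ zs ((j + 2 : Nat) : Int)
    (pvFoldBump_nodup _ _ PySem.Dict.nodup_keys_empty)]
  rw [pvTermsMid_eq (j + 2) zs]
  rw [List.foldl_append, List.foldl_append]
  have hzc : ((j + 2) * (j + 2 + 1) / 2 - 1 : Nat) = pvTri (j + 3) - 1 := by
    unfold pvTri
    rw [show (j + 2 + 1 : Nat) = j + 3 from by omega, show (j + 3 - 1 : Nat) = j + 2 from by omega,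
      Nat.mul_comm]
  rw [hzc]
  have hP2 : ((pvMidFrom (j + 2) zs ((j + 2 : Nat) : Int)).foldl (fun o q => pvBump o q.1 q.2)
      ((pvTermsFirst xs zs (j + 2)).foldl (fun o q => pvBump o q.1 q.2)
        PySem.Dict.empty)).keys.Nodup :=
    pvFoldBump_nodup _ _ (pvFoldBump_nodup _ _ PySem.Dict.nodup_keys_empty)
  simp only [List.range_succ, List.range_zero, List.map_append, List.map_cons, List.map_nil,
    List.nil_append, List.singleton_append, List.getD_cons_zero, List.getD_cons_succ,
    Nat.cast_zero, Nat.cast_one, zero_add]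
  have h21 : (1 : Int) + (zs + ((pvTri (j + 3) - 1 : Nat) : Int) - 2)
      = zs + ((pvTri (j + 3) - 1 : Nat) : Int) - 1 := by ring
  have hs : ((pvTri (j + 3) - 1 : Nat) : Int)
      = ((j + 2 : Nat) : Int) + ((pvTri (j + 2) - 1 : Nat) : Int) := by
    rw [Nat.cast_sub (pvTri_pos _ (by omega)), Nat.cast_sub (pvTri_pos _ (by omega)),
      show (j + 3 : Nat) = (j + 2) + 1 from rfl, pvTri_succ (j + 2)]
    push_cast
    ring
  unfold pvTermsEnd
  by_cases hy : y = 0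
  · rw [pvStep_output0 _ hP2 y _ _ _ hy
      (pvZ_ne _ _ (by omega)) (pvS_ne_pvZ _ _) (pvS_ne_pvZ _ _), if_pos hy]
    simp only [List.cons_append, List.nil_append, List.foldl_cons, List.foldl_nil]
    rw [h21, hs]
  · rw [pvStep_output1 _ hP2 y _ _ _ hy
      (pvZ_ne _ _ (by omega)) (pvS_ne_pvZ _ _) (pvS_ne_pvZ _ _), if_neg hy]
    simp only [List.cons_append, List.nil_append, List.foldl_cons, List.foldl_nil]
    rw [h21, hs]

theorem make_polynomial_for_datapoint_changed : Claim_changed_make_polynomial_for_datapoint := by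
  unfold Claim_changed_make_polynomial_for_datapoint; decide
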